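-- pv_equiv track=rewrite | github.com/kseni-barin/module_2_hard | module_2_hard.py | fun_dict_from_pairs_of_numbers
-- ===== SOURCE A (Python) =====
-- def fun_dict_from_pairs_of_numbers (m):
--     dict_ = {}
--     for i in range(1, m+1):
--         if m % i == 0:
--             for j in range(1, int(i/2)+1):
--                 a = j
--                 b = i - j
--                 if a != b and a != 0 and b != 0:
--                     if a not in dict_: # создаем пару ключ:значение
--                         list_ = []
--                         list_.append(b)
--                         dict_.update({a: list_})
--                     elif a in dict_: # к значению существующего ключа добавляем b
--                         b_value = []
--                         b_value.extend(dict_[a])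
--                         b_value.append(b)
--                         dict_[a] = b_value
--         else:
--             continue
--     return dict_
-- ===== SOURCE B (Python) =====
-- def fun_dict_from_pairs_of_numbers(m):
--     # Per-key construction: precompute divisors once, then build each key's
--     # full value list in one shot (key a gets b = i - a for every divisor i > 2*a).
--     divisors = [i for i in range(1, m + 1) if m % i == 0]
--     result = {}
--     for a in range(1, m // 2 + 1):
--         bs = [i - a for i in divisors if i > 2 * a]
--         if bs:
--             result[a] = bs
--     return result
-- ===== Notes on version B (the rewrite author's own statement) =====
-- stated objective: alternative
-- what changed: Inverts the construction: instead of distributing pair-sums per divisor into a dict with membership checks and copy-and-append value updates, B precomputes the divisor list once and builds each key's complete value list in a single per-key pass, inserting a key only when its list is nonempty.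
import Mathlib
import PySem

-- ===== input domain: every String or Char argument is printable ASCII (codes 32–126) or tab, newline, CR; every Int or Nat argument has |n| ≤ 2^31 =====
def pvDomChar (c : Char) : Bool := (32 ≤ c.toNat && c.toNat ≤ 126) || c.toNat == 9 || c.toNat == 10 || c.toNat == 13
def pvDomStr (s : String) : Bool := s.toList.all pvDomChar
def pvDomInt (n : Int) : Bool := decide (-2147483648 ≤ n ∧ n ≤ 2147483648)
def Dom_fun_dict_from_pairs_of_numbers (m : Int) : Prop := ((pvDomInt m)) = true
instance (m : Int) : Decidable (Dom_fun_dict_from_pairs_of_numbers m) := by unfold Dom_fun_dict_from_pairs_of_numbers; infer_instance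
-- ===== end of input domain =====

-- B inverts A's construction: it precomputes the divisor list once and builds each key's complete
-- value list in a single per-key pass, instead of A's per-divisor distribution into a dict with
-- membership checks and copy-and-append updates (objective: alternative decomposition).

-- ===== PORT A =====
-- literal port of A: for i in range(1, m+1): if m % i == 0: for j in range(1, int(i/2)+1): …
-- int(i/2) is PySem.Int.truncdiv i 2 (exact here: |i| < 2^53 on the stated domain);
-- dict_[a] in the 'elif' branch is d.getD a [] (that branch has just checked 'a in dict_', so no KeyError).
def fun_dict_from_pairs_of_numbers (m : Int) : List (Int × List Int) :=
  ((PySem.List.pyRange 1 (m + 1)).foldl (fun d i =>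
    if PySem.Int.mod m i == 0 then
      (PySem.List.pyRange 1 (PySem.Int.truncdiv i 2 + 1)).foldl (fun d j =>
        if j ≠ i - j ∧ j ≠ 0 ∧ i - j ≠ 0 then
          if d.contains j = false then
            d.insert j [i - j]
          else
            d.insert j (d.getD j [] ++ [i - j])
        else d) d
    else d) PySem.Dict.empty).items

-- ===== PORT B =====
def fun_dict_from_pairs_of_numbers_alt (m : Int) : List (Int × List Int) :=
  let divisors := (PySem.List.pyRange 1 (m + 1)).filter (fun i => PySem.Int.mod m i == 0)
  ((PySem.List.pyRange 1 (PySem.Int.floordiv m 2 + 1)).foldl (fun d a =>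
    let bs := (divisors.filter (fun i => decide (2 * a < i))).map (fun i => i - a)
    if bs ≠ [] then d.insert a bs else d) PySem.Dict.empty).items

-- ===== PRECONDITION & SPEC =====
def Spec_fun_dict_from_pairs_of_numbers (m : Int) (out : List (Int × List Int)) : Prop := out = fun_dict_from_pairs_of_numbers_alt m
instance (m : Int) (out : List (Int × List Int)) : Decidable (Spec_fun_dict_from_pairs_of_numbers m out) := by unfold Spec_fun_dict_from_pairs_of_numbers; infer_instance

-- ===== CLAIM (what is proved, stated in full; the proofs are below) =====
def Claim_equal_fun_dict_from_pairs_of_numbers : Prop := ∀ (m : Int), Dom_fun_dict_from_pairs_of_numbers m → Spec_fun_dict_from_pairs_of_numbers m (fun_dict_from_pairs_of_numbers m)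

-- ===== LEMMAS AND PROOFS =====
theorem pvRange_nil {a b : Int} (h : b ≤ a) : PySem.List.pyRange a b = [] := by
  simp [PySem.List.pyRange, if_neg (by omega : ¬ a < b)]

theorem pvRange_pairwise (a b : Int) : (PySem.List.pyRange a b).Pairwise (· < ·) := by
  simp only [PySem.List.pyRange]
  split
  · exact List.Pairwise.nil
  · refine List.pairwise_map.2 ?_
    refine (List.pairwise_lt_range).imp ?_
    intro x y hxy; omega

theorem pvRange_nodup (a b : Int) : (PySem.List.pyRange a b).Nodup := by
  exact (pvRange_pairwise a b).imp (fun h => by omega)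

theorem pvFoldlConst {α β : Type} (l : List α) (init : β) : l.foldl (fun d _ => d) init = init := by
  induction l with
  | nil => rfl
  | cons x xs ih => simp only [List.foldl_cons]; exact ih

theorem pvMapKeys (M : Int) (f : Int → List Int) :
    (PySem.Dict.mk ((PySem.List.pyRange 1 (M + 1)).map (fun a => (a, f a)))).keys = PySem.List.pyRange 1 (M + 1) := by
  simp [PySem.Dict.keys_mk, List.map_map, Function.comp_def]

theorem pvContains (M k : Int) (f : Int → List Int) :
    (PySem.Dict.mk ((PySem.List.pyRange 1 (M + 1)).map (fun a => (a, f a)))).contains k = decide (1 ≤ k ∧ k ≤ M) := by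
  rw [PySem.Dict.contains_eq_decide_mem_keys, pvMapKeys]
  simp [PySem.List.mem_pyRange_one]

theorem pvGetD (M k : Int) (f : Int → List Int) (h1 : 1 ≤ k) (h2 : k ≤ M) :
    (PySem.Dict.mk ((PySem.List.pyRange 1 (M + 1)).map (fun a => (a, f a)))).getD k [] = f k := by
  have hm : (k, f k) ∈ (PySem.Dict.mk ((PySem.List.pyRange 1 (M + 1)).map (fun a => (a, f a)))).items :=
    List.mem_map.2 ⟨k, PySem.List.mem_pyRange_one.2 ⟨h1, by omega⟩, rfl⟩
  have hn : (PySem.Dict.mk ((PySem.List.pyRange 1 (M + 1)).map (fun a => (a, f a)))).keys.Nodup := by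
    rw [pvMapKeys]; exact pvRange_nodup _ _
  exact PySem.Dict.getD_of_mem_items _ hm hn []

theorem pvCore (i K : Int) (g : Int → List Int) :
    ∀ (n : Nat) (d : PySem.Dict Int (List Int)),
      d.items = (PySem.List.pyRange 1 (K + 1)).map (fun a => (a, g a)) →
      ((PySem.List.pyRange 1 ((n : Int) + 1)).foldl (fun d j => d.insert j (d.getD j [] ++ [i - j])) d).items
        = (PySem.List.pyRange 1 (max K (n : Int) + 1)).map
            (fun a => (a, (if a ≤ K then g a else []) ++ (if a ≤ (n : Int) then [i - a] else []))) := by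
  intro n
  induction n with
  | zero =>
    intro d hd
    push_cast
    rw [pvRange_nil (by omega : (1:Int) ≤ 1)]
    simp only [List.foldl_nil]
    rw [hd]
    rcases lt_or_ge 0 K with hK | hK
    case inr =>
      rw [pvRange_nil (by omega : K + 1 ≤ 1), pvRange_nil (by omega : max K 0 + 1 ≤ 1)]
      rfl
    case inl =>
      rw [max_eq_left (by omega : (0:Int) ≤ K)]
      refine List.map_congr_left ?_
      intro a ha
      have := PySem.List.mem_pyRange_one.1 ha
      rw [if_pos (by omega), if_neg (by omega)]
      simp
  | succ n ih =>
    intro d hd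
    have hcast : ((n + 1 : Nat) : Int) = (n : Int) + 1 := by push_cast; ring
    rw [hcast, PySem.List.pyRange_one_succ_right (by omega : (1:Int) ≤ (n:Int) + 1),
        List.foldl_append]
    rw [List.foldl_cons, List.foldl_nil]
    -- the dict after j = 1..n
    set dn := ((PySem.List.pyRange 1 ((n : Int) + 1)).foldl (fun d j => d.insert j (d.getD j [] ++ [i - j])) d) with hdn
    have hitems := ih d hd
    -- dn as a mk of its items
    have hdnmk : dn = PySem.Dict.mk ((PySem.List.pyRange 1 (max K (n:Int) + 1)).map
        (fun a => (a, (if a ≤ K then g a else []) ++ (if a ≤ (n : Int) then [i - a] else [])))) :=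
      PySem.Dict.ext hitems
    rw [hdnmk]
    by_cases hle : ((n:Int) + 1) ≤ K
    · -- key n+1 already present: in-place replacement
      have hmax : max K (n:Int) = K := max_eq_left (by omega)
      have hmax' : max K ((n:Int)+1) = K := max_eq_left (by omega)
      rw [hmax, hmax']
      rw [pvGetD K ((n:Int)+1) _ (by omega) hle]
      rw [PySem.Dict.items_insert, pvContains, if_pos (by simp; omega)]
      rw [List.map_map]
      refine List.map_congr_left ?_
      intro a ha
      have haR := PySem.List.mem_pyRange_one.1 ha
      by_cases hae : a = (n:Int) + 1
      · subst hae
        simp only [Function.comp_def]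
        rw [if_pos (by simp)]
        rw [if_pos hle, if_neg (by omega : ¬ ((n:Int) + 1 ≤ (n:Int)))]
        simp
      · simp only [Function.comp_def]
        rw [if_neg (by simp [hae])]
        have : (if a ≤ (n:Int) then [i - a] else []) = (if a ≤ (n:Int) + 1 then [i - a] else []) := by
          split_ifs <;> first | rfl | omega
        rw [this]
    · -- key n+1 fresh: appended at the end
      have hnK : K ≤ (n:Int) := by omega
      have hmax : max K (n:Int) = (n:Int) := max_eq_right hnK
      have hmax' : max K ((n:Int)+1) = (n:Int)+1 := max_eq_right (by omega)
      rw [hmax, hmax']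
      have hcontf : (PySem.Dict.mk ((PySem.List.pyRange 1 ((n:Int) + 1)).map
          (fun a => (a, (if a ≤ K then g a else []) ++ (if a ≤ (n : Int) then [i - a] else []))))).contains ((n:Int)+1) = false := by
        rw [pvContains]; simp
      rw [PySem.Dict.getD_of_not_contains _ [] hcontf]
      rw [PySem.Dict.items_insert, hcontf]
      rw [if_neg (by simp)]
      rw [PySem.List.pyRange_one_succ_right (by omega : (1:Int) ≤ (n:Int)+1), List.map_append]
      congr 1
      · refine List.map_congr_left ?_
        intro a ha
        have haR := PySem.List.mem_pyRange_one.1 ha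
        have : (if a ≤ (n:Int) then [i - a] else []) = (if a ≤ (n:Int) + 1 then [i - a] else []) := by
          split_ifs <;> first | rfl | omega
        rw [this]
      · simp only [List.map_cons, List.map_nil]
        rw [if_neg (by omega : ¬ ((n:Int) + 1 ≤ K))]
        simp

theorem pvInner (i K : Int) (hi : 1 ≤ i) (h2K : 2 * K < i) (g : Int → List Int)
    (d : PySem.Dict Int (List Int))
    (hd : d.items = (PySem.List.pyRange 1 (K + 1)).map (fun a => (a, g a))) :
    ((PySem.List.pyRange 1 (PySem.Int.truncdiv i 2 + 1)).foldl (fun d j =>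
        if j ≠ i - j ∧ j ≠ 0 ∧ i - j ≠ 0 then
          if d.contains j = false then d.insert j [i - j]
          else d.insert j (d.getD j [] ++ [i - j])
        else d) d).items
      = (PySem.List.pyRange 1 (PySem.Int.floordiv (i - 1) 2 + 1)).map
          (fun a => (a, (if a ≤ K then g a else []) ++ [i - a])) := by
  have htr : PySem.Int.truncdiv i 2 = PySem.Int.floordiv i 2 := by
    simp only [PySem.Int.truncdiv, PySem.Int.floordiv]
    rw [Int.tdiv_eq_ediv_of_nonneg (by omega), Int.fdiv_eq_ediv_of_nonneg i (by omega)]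
  set Q := PySem.Int.floordiv i 2 with hQ
  set K' := PySem.Int.floordiv (i - 1) 2 with hK'
  have hQb : Q * 2 ≤ i ∧ i < (Q + 1) * 2 :=
    (PySem.Int.floordiv_eq_iff_of_pos (by omega)).1 rfl
  have hKb : K' * 2 ≤ i - 1 ∧ i - 1 < (K' + 1) * 2 :=
    (PySem.Int.floordiv_eq_iff_of_pos (by omega)).1 rfl
  have hKQ : K' ≤ Q ∧ Q ≤ K' + 1 ∧ 0 ≤ K' ∧ K ≤ K' := by omega
  rw [htr, PySem.List.pyRange_one_append 1 (K' + 1) (Q + 1) (by omega) (by omega),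
      List.foldl_append]
  have hstep1 : List.foldl (fun d j =>
        if j ≠ i - j ∧ j ≠ 0 ∧ i - j ≠ 0 then
          if d.contains j = false then d.insert j [i - j]
          else d.insert j (d.getD j [] ++ [i - j])
        else d) d (PySem.List.pyRange 1 (K' + 1))
      = List.foldl (fun d j => d.insert j (d.getD j [] ++ [i - j])) d (PySem.List.pyRange 1 (K' + 1)) := by
    refine PySem.List.foldl_congr_mem _ _ _ _ ?_
    intro acc j hj
    have hjR := PySem.List.mem_pyRange_one.1 hj
    rw [if_pos (by refine ⟨by omega, by omega, by omega⟩)]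
    by_cases hc : acc.contains j = false
    · rw [if_pos hc, PySem.Dict.getD_of_not_contains _ [] hc]
      simp
    · rw [if_neg hc]
  rw [hstep1]
  have hcast : ((K'.toNat : Nat) : Int) = K' := Int.toNat_of_nonneg (by omega)
  have hcore := pvCore i K g K'.toNat d hd
  rw [hcast] at hcore
  have hstep2 : ∀ dmid : PySem.Dict Int (List Int), List.foldl (fun d j =>
        if j ≠ i - j ∧ j ≠ 0 ∧ i - j ≠ 0 then
          if d.contains j = false then d.insert j [i - j]
          else d.insert j (d.getD j [] ++ [i - j])
        else d) dmid (PySem.List.pyRange (K' + 1) (Q + 1)) = dmid := by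
    intro dmid
    rw [PySem.List.foldl_congr_mem _ _ (fun d _ => d) dmid ?_]
    · exact pvFoldlConst _ _
    · intro acc j hj
      have hjR := PySem.List.mem_pyRange_one.1 hj
      rw [if_neg (by omega)]
  rw [hstep2, hcore]
  rw [max_eq_right (by omega : K ≤ K')]
  refine List.map_congr_left ?_
  intro a ha
  have haR := PySem.List.mem_pyRange_one.1 ha
  rw [if_pos (by omega : a ≤ K')]

def pvDivs (m : Int) : List Int := (PySem.List.pyRange 1 (m + 1)).filter (fun i => PySem.Int.mod m i == 0)
def pvVals (D : List Int) (a : Int) : List Int := (D.filter (fun i => decide (2 * a < i))).map (fun i => i - a)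
def pvK (D : List Int) : Int := PySem.Int.floordiv ((D.getLast?.getD 0) - 1) 2

theorem pvMemLeLast {D : List Int} (h : D.Pairwise (· < ·)) {y : Int} (hy : y ∈ D) :
    y ≤ D.getLast?.getD 0 := by
  induction D using List.reverseRecOn with
  | nil => cases hy
  | append_singleton D x ih =>
    rw [List.getLast?_concat]
    rcases List.pairwise_append.1 h with ⟨_, _, hcross⟩
    rcases List.mem_append.1 hy with hyD | hyx
    · have := hcross y hyD x (List.mem_singleton_self x)
      simpa using le_of_lt this
    · simp at hyx
      simp [hyx]

theorem pvLast {D : List Int} (h : D.Pairwise (· < ·)) {x : Int} (hx : x ∈ D)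
    (hub : ∀ y ∈ D, y ≤ x) : D.getLast?.getD 0 = x := by
  have hne : D ≠ [] := List.ne_nil_of_mem hx
  have hlm : D.getLast hne ∈ D := List.getLast_mem hne
  have h1 : D.getLast?.getD 0 = D.getLast hne := by
    rw [List.getLast?_eq_some_getLast hne]; rfl
  have h2 := pvMemLeLast h hlm
  have h3 := pvMemLeLast h hx
  have h4 := hub _ hlm
  omega

theorem pvValsAppend (D : List Int) (i a : Int) :
    pvVals (D ++ [i]) a = pvVals D a ++ (if 2 * a < i then [i - a] else []) := by
  simp only [pvVals, List.filter_append, List.map_append]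
  congr 1
  by_cases hc : 2 * a < i
  · rw [if_pos hc]; simp [hc]
  · rw [if_neg hc]; simp [hc]

theorem pvOuter : ∀ (D : List Int), D.Pairwise (· < ·) → (∀ x ∈ D, 1 ≤ x) →
    (D.foldl (fun d i =>
      (PySem.List.pyRange 1 (PySem.Int.truncdiv i 2 + 1)).foldl (fun d j =>
        if j ≠ i - j ∧ j ≠ 0 ∧ i - j ≠ 0 then
          if d.contains j = false then d.insert j [i - j]
          else d.insert j (d.getD j [] ++ [i - j])
        else d) d) PySem.Dict.empty).items
      = (PySem.List.pyRange 1 (pvK D + 1)).map (fun a => (a, pvVals D a)) := by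
  intro D
  induction D using List.reverseRecOn with
  | nil =>
    intro _ _
    rw [pvRange_nil (by decide : pvK [] + 1 ≤ 1)]
    rfl
  | append_singleton D i ih =>
    intro hpw hpos
    rcases List.pairwise_append.1 hpw with ⟨hpwD, _, hcross⟩
    have hiD : ∀ x ∈ D, x < i := fun x hx => hcross x hx i (List.mem_singleton_self i)
    have hi1 : 1 ≤ i := hpos i (by simp)
    have hposD : ∀ x ∈ D, 1 ≤ x := fun x hx => hpos x (List.mem_append_left _ hx)
    rw [List.foldl_append, List.foldl_cons, List.foldl_nil]
    have hK2 : 2 * pvK D < i := by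
      rcases List.eq_nil_or_concat D with hDnil | ⟨D', x, hDx⟩
      · subst hDnil
        simp only [pvK]
        have : PySem.Int.floordiv (0 - 1) 2 = -1 := by decide
        simp at this ⊢
        omega
      · have hne : D ≠ [] := by subst hDx; simp
        have hlast : D.getLast?.getD 0 ∈ D := by
          rw [List.getLast?_eq_some_getLast hne]
          exact List.getLast_mem hne
        have h1 := hiD _ hlast
        have hb := (PySem.Int.floordiv_eq_iff_of_pos (by omega : (0:Int) < 2)).1
          (rfl : PySem.Int.floordiv (D.getLast?.getD 0 - 1) 2 = _)
        simp only [pvK]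
        omega
    have hinner := pvInner i (pvK D) hi1 hK2 (pvVals D) _ (ih hpwD hposD)
    rw [hinner]
    have hKnew : pvK (D ++ [i]) = PySem.Int.floordiv (i - 1) 2 := by
      simp [pvK]
    rw [hKnew]
    refine List.map_congr_left ?_
    intro a ha
    have haR := PySem.List.mem_pyRange_one.1 ha
    have hb := (PySem.Int.floordiv_eq_iff_of_pos (by omega : (0:Int) < 2)).1
      (rfl : PySem.Int.floordiv (i - 1) 2 = _)
    rw [pvValsAppend, if_pos (by omega : 2 * a < i)]
    congr 1
    by_cases haK : a ≤ pvK D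
    · rw [if_pos haK]
    · -- a beyond the old bound: pvVals D a is empty
      rw [if_neg haK]
      have : pvVals D a = [] := by
        simp only [pvVals, List.map_eq_nil_iff, List.filter_eq_nil_iff]
        intro x hx
        have hx1 := pvMemLeLast hpwD hx
        have hbD := (PySem.Int.floordiv_eq_iff_of_pos (by omega : (0:Int) < 2)).1
          (rfl : PySem.Int.floordiv (D.getLast?.getD 0 - 1) 2 = _)
        simp only [pvK] at haK
        simp
        omega
      rw [this]


theorem pvAlt (m : Int) :
    fun_dict_from_pairs_of_numbers_alt m
      = (PySem.List.pyRange 1 (PySem.Int.floordiv (m - 1) 2 + 1)).map (fun a => (a, pvVals (pvDivs m) a)) := by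
  simp only [fun_dict_from_pairs_of_numbers_alt]
  have hdivs : (PySem.List.pyRange 1 (m + 1)).filter (fun i => PySem.Int.mod m i == 0) = pvDivs m := rfl
  rw [hdivs]
  have hvals : ∀ a : Int, ((pvDivs m).filter (fun i => decide (2 * a < i))).map (fun i => i - a)
      = pvVals (pvDivs m) a := fun _ => rfl
  simp only [hvals]
  have hb1 := (PySem.Int.floordiv_eq_iff_of_pos (by omega : (0:Int) < 2)).1
    (rfl : PySem.Int.floordiv (m - 1) 2 = _)
  have hb2 := (PySem.Int.floordiv_eq_iff_of_pos (by omega : (0:Int) < 2)).1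
    (rfl : PySem.Int.floordiv m 2 = _)
  set M1 := PySem.Int.floordiv (m - 1) 2 with hM1
  set M2 := PySem.Int.floordiv m 2 with hM2
  by_cases hm : 1 ≤ m
  case neg =>
    rw [pvRange_nil (show M2 + 1 ≤ 1 by omega), pvRange_nil (show M1 + 1 ≤ 1 by omega)]
    rfl
  case pos =>
  have hmdiv : m ∈ pvDivs m := by
    refine List.mem_filter.2 ⟨PySem.List.mem_pyRange_one.2 ⟨by omega, by omega⟩, ?_⟩
    simp [(PySem.Int.mod_eq_zero_iff_dvd m m).2 dvd_rfl]
  have hdub : ∀ y ∈ pvDivs m, y ≤ m := by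
    intro y hy
    have := PySem.List.mem_pyRange_one.1 (List.mem_filter.1 hy).1
    omega
  rw [PySem.List.pyRange_one_append 1 (M1 + 1) (M2 + 1) (by omega) (by omega),
      List.foldl_append]
  have hseg1 : List.foldl (fun d a =>
        if pvVals (pvDivs m) a ≠ [] then d.insert a (pvVals (pvDivs m) a) else d)
        PySem.Dict.empty (PySem.List.pyRange 1 (M1 + 1))
      = List.foldl (fun d a => d.insert a (pvVals (pvDivs m) a)) PySem.Dict.empty (PySem.List.pyRange 1 (M1 + 1)) := by
    refine PySem.List.foldl_congr_mem _ _ _ _ ?_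
    intro acc a ha
    have haR := PySem.List.mem_pyRange_one.1 ha
    have hne : pvVals (pvDivs m) a ≠ [] := by
      refine List.ne_nil_of_mem (a := m - a) ?_
      exact List.mem_map.2 ⟨m, List.mem_filter.2 ⟨hmdiv, by simp; omega⟩, rfl⟩
    rw [if_pos hne]
  rw [hseg1]
  have hfresh := PySem.Dict.items_foldl_insert_fresh (PySem.List.pyRange 1 (M1 + 1))
    (fun a => a) (fun a => pvVals (pvDivs m) a) PySem.Dict.empty
    (by intro a _; simp) (by simpa using pvRange_nodup 1 (M1 + 1))
  have hseg2 : ∀ dmid : PySem.Dict Int (List Int), List.foldl (fun d a =>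
        if pvVals (pvDivs m) a ≠ [] then d.insert a (pvVals (pvDivs m) a) else d)
        dmid (PySem.List.pyRange (M1 + 1) (M2 + 1)) = dmid := by
    intro dmid
    rw [PySem.List.foldl_congr_mem _ _ (fun d _ => d) dmid ?_]
    · exact pvFoldlConst _ _
    · intro acc a ha
      have haR := PySem.List.mem_pyRange_one.1 ha
      have hnil : pvVals (pvDivs m) a = [] := by
        simp only [pvVals, List.map_eq_nil_iff, List.filter_eq_nil_iff]
        intro x hx
        have := hdub x hx
        simp
        omega
      rw [hnil, if_neg (by simp)]
  rw [hseg2, hfresh]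
  simp
  rfl


theorem pvFinal (m : Int) : fun_dict_from_pairs_of_numbers m = fun_dict_from_pairs_of_numbers_alt m := by
  have hA : fun_dict_from_pairs_of_numbers m
      = ((pvDivs m).foldl (fun d i =>
          (PySem.List.pyRange 1 (PySem.Int.truncdiv i 2 + 1)).foldl (fun d j =>
            if j ≠ i - j ∧ j ≠ 0 ∧ i - j ≠ 0 then
              if d.contains j = false then d.insert j [i - j]
              else d.insert j (d.getD j [] ++ [i - j])
            else d) d) PySem.Dict.empty).items := by
    rw [fun_dict_from_pairs_of_numbers, pvDivs, List.foldl_filter]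
  have hpw : (pvDivs m).Pairwise (· < ·) :=
    ((pvRange_pairwise 1 (m + 1)).sublist List.filter_sublist)
  have hpos : ∀ x ∈ pvDivs m, 1 ≤ x := by
    intro x hx
    have := PySem.List.mem_pyRange_one.1 (List.mem_filter.1 hx).1
    omega
  rw [hA, pvOuter (pvDivs m) hpw hpos, pvAlt]
  by_cases hm : 1 ≤ m
  · have hmdiv : m ∈ pvDivs m := by
      refine List.mem_filter.2 ⟨PySem.List.mem_pyRange_one.2 ⟨by omega, by omega⟩, ?_⟩
      simp [(PySem.Int.mod_eq_zero_iff_dvd m m).2 dvd_rfl]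
    have hdub : ∀ y ∈ pvDivs m, y ≤ m := by
      intro y hy
      have := PySem.List.mem_pyRange_one.1 (List.mem_filter.1 hy).1
      omega
    have : pvK (pvDivs m) = PySem.Int.floordiv (m - 1) 2 := by
      simp only [pvK, pvLast hpw hmdiv hdub]
    rw [this]
  · have hnil : pvDivs m = [] := by
      simp only [pvDivs]
      rw [pvRange_nil (by omega : m + 1 ≤ 1)]
      rfl
    rw [hnil]
    rw [pvRange_nil (show pvK [] + 1 ≤ 1 by decide)]
    rw [pvRange_nil (show PySem.Int.floordiv (m - 1) 2 + 1 ≤ 1 by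
      have := (PySem.Int.floordiv_eq_iff_of_pos (by omega : (0:Int) < 2)).1
        (rfl : PySem.Int.floordiv (m - 1) 2 = _)
      omega)]

-- ===== VERDICT (by name: the statement is the Claim_ definition above) =====
theorem fun_dict_from_pairs_of_numbers_spec : Claim_equal_fun_dict_from_pairs_of_numbers := by
  intro m _
  unfold Spec_fun_dict_from_pairs_of_numbers
  exact pvFinal m
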